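-- pv_equiv track=rewrite | github.com/shampsdev/rzd-ml | src/label2id.py | thousand
-- ===== SOURCE A (Python) =====
-- units = (
--     "ноль",
--     ("один", "одна"),
--     ("два", "две"),
--     "три",
--     "четыре",
--     "пять",
--     "шесть",
--     "семь",
--     "восемь",
--     "девять",
-- )
--
-- teens = (
--     "десять",
--     "одиннадцать",
--     "двенадцать",
--     "тринадцать",
--     "четырнадцать",
--     "пятнадцать",
--     "шестнадцать",
--     "семнадцать",
--     "восемнадцать",
--     "девятнадцать",
-- )
--
-- tens = (
--     teens,
--     "двадцать",
--     "тридцать",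
--     "сорок",
--     "пятьдесят",
--     "шестьдесят",
--     "семьдесят",
--     "восемьдесят",
--     "девяносто",
-- )
--
-- hundreds = (
--     "сто",
--     "двести",
--     "триста",
--     "четыреста",
--     "пятьсот",
--     "шестьсот",
--     "семьсот",
--     "восемьсот",
--     "девятьсот",
-- )
--
-- def thousand(rest, sex):
--     """Converts numbers from 19 to 999"""
--     prev = 0
--     plural = 2
--     name = []
--     use_teens = rest % 100 >= 10 and rest % 100 <= 19
--     if not use_teens:
--         data = ((units, 10), (tens, 100), (hundreds, 1000))
--     else:
--         data = ((teens, 10), (hundreds, 1000))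
--     for names, x in data:
--         cur = int(((rest - prev) % x) * 10 / x)
--         prev = rest % x
--         if x == 10 and use_teens:
--             plural = 2
--             name.append(teens[cur])
--         elif cur == 0:
--             continue
--         elif x == 10:
--             name_ = names[cur]
--             if isinstance(name_, tuple):
--                 name_ = name_[0 if sex == "m" else 1]
--             name.append(name_)
--             if cur >= 2 and cur <= 4:
--                 plural = 1
--             elif cur == 1:
--                 plural = 0
--             else:
--                 plural = 2
--         else:
--             name.append(names[cur - 1])
--     return plural, name
-- ===== SOURCE B (Python) =====
-- UNITS_M = ("ноль", "один", "два", "три", "четыре", "пять", "шесть", "семь", "восемь", "девять")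
-- UNITS_F = ("ноль", "одна", "две", "три", "четыре", "пять", "шесть", "семь", "восемь", "девять")
-- TEENS = ("десять", "одиннадцать", "двенадцать", "тринадцать", "четырнадцать",
--          "пятнадцать", "шестнадцать", "семнадцать", "восемнадцать", "девятнадцать")
-- TENS = ("двадцать", "тридцать", "сорок", "пятьдесят", "шестьдесят",
--         "семьдесят", "восемьдесят", "девяносто")
-- HUNDREDS = ("сто", "двести", "триста", "четыреста", "пятьсот",
--             "шестьсот", "семьсот", "восемьсот", "девятьсот")
--
--
-- def thousand(rest, sex):
--     """Converts numbers from 19 to 999"""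
--     u = rest % 10
--     t = rest % 100 // 10
--     h = rest % 1000 // 100
--     plural = 2
--     name = []
--     if t == 1:
--         name.append(TEENS[u])
--     else:
--         if u != 0:
--             name.append((UNITS_M if sex == "m" else UNITS_F)[u])
--             plural = 0 if u == 1 else (1 if u <= 4 else 2)
--         if t != 0:
--             name.append(TENS[t - 2])
--     if h != 0:
--         name.append(HUNDREDS[h - 1])
--     return plural, name
-- ===== Notes on version B (the rewrite author's own statement) =====
-- stated objective: simpler
-- what changed: Replaces A's stateful modular loop over ((units,10),(tens,100),(hundreds,1000)) with float-division digit extraction by direct computation of the three digits u = rest%10, t = rest%100//10, h = rest%1000//100 and straight-line branches (teens / units+tens / hundreds), with two plain gender word tables instead of tuple-typed entries and an isinstance check.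
import Mathlib
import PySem

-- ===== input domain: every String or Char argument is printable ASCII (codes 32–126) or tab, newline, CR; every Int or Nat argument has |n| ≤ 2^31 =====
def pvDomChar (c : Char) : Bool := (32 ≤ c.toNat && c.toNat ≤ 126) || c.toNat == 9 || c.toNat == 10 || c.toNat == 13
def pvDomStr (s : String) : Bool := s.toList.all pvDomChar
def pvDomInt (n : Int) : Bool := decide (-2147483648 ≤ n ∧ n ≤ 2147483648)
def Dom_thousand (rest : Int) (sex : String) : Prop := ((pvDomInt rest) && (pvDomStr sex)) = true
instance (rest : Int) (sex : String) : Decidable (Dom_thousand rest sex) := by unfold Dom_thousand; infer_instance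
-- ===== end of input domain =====

-- B replaces A's modular loop over (units,10),(tens,100),(hundreds,1000) by direct digit
-- extraction (u, t, h) with straight-line branches; objective: simpler, same behaviour.

-- ===== PORT A =====
-- units: entries are either a plain string or a (masculine, feminine) pair, as in Python.
def pvUnitsA : List (String ⊕ (String × String)) :=
  [Sum.inl "ноль", Sum.inr ("один", "одна"), Sum.inr ("два", "две"), Sum.inl "три",
   Sum.inl "четыре", Sum.inl "пять", Sum.inl "шесть", Sum.inl "семь",
   Sum.inl "восемь", Sum.inl "девять"]

def pvTeensA : List String :=
  ["десять", "одиннадцать", "двенадцать", "тринадцать", "четырнадцать",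
   "пятнадцать", "шестнадцать", "семнадцать", "восемнадцать", "девятнадцать"]

-- Python's `tens` has the `teens` tuple at index 0; that slot is only ever read when
-- cur = 1 in the x = 100 stage, which is unreachable (cur = 1 there ↔ use_teens).
-- We keep a placeholder "" in that slot.
def pvTensA : List (String ⊕ (String × String)) :=
  [Sum.inl "", Sum.inl "двадцать", Sum.inl "тридцать", Sum.inl "сорок", Sum.inl "пятьдесят",
   Sum.inl "шестьдесят", Sum.inl "семьдесят", Sum.inl "восемьдесят", Sum.inl "девяносто"]

def pvHundredsA : List (String ⊕ (String × String)) :=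
  [Sum.inl "сто", Sum.inl "двести", Sum.inl "триста", Sum.inl "четыреста", Sum.inl "пятьсот",
   Sum.inl "шестьсот", Sum.inl "семьсот", Sum.inl "восемьсот", Sum.inl "девятьсот"]

-- one iteration of A's `for names, x in data` loop; state = (prev, plural, name).
-- `int(((rest - prev) % x) * 10 / x)`: the numerator is a nonnegative small int, the float
-- division is exact enough that int() truncation equals floor division — ported as floordiv.
-- list indexing is always in range here; `.getD` only discharges the Option.
def pvStepA (rest : Int) (sex : String) (useTeens : Bool)
    (names : List (String ⊕ (String × String))) (x : Int)
    (st : Int × Int × List String) : Int × Int × List String :=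
  let prev := st.1
  let plural := st.2.1
  let name := st.2.2
  let cur := PySem.Int.floordiv ((PySem.Int.mod (rest - prev) x) * 10) x
  let prev' := PySem.Int.mod rest x
  if x == 10 && useTeens then
    (prev', 2, name ++ [(PySem.List.pyGet? pvTeensA cur).getD ""])
  else if cur == 0 then
    (prev', plural, name)
  else if x == 10 then
    let entry := (PySem.List.pyGet? names cur).getD (Sum.inl "")
    let nm := match entry with
      | Sum.inl s => s
      | Sum.inr (m, f) => if sex == "m" then m else f
    let plural' : Int := if 2 ≤ cur ∧ cur ≤ 4 then 1 else if cur == 1 then 0 else 2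
    (prev', plural', name ++ [nm])
  else
    let nm := match (PySem.List.pyGet? names (cur - 1)).getD (Sum.inl "") with
      | Sum.inl s => s
      | Sum.inr (m, _) => m   -- unreachable: tens/hundreds entries are all plain strings
    (prev', plural, name ++ [nm])

def thousand (rest : Int) (sex : String) : Int × List String :=
  let useTeens : Bool := (10 ≤ PySem.Int.mod rest 100) && (PySem.Int.mod rest 100 ≤ 19)
  let data : List (List (String ⊕ (String × String)) × Int) :=
    if !useTeens then [(pvUnitsA, 10), (pvTensA, 100), (pvHundredsA, 1000)]
    else [(pvTeensA.map Sum.inl, 10), (pvHundredsA, 1000)]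
  let r := data.foldl (fun st p => pvStepA rest sex useTeens p.1 p.2 st) (0, 2, [])
  (r.2.1, r.2.2)

-- ===== PORT B =====
def pvUnitsM : List String :=
  ["ноль", "один", "два", "три", "четыре", "пять", "шесть", "семь", "восемь", "девять"]
def pvUnitsF : List String :=
  ["ноль", "одна", "две", "три", "четыре", "пять", "шесть", "семь", "восемь", "девять"]
def pvTeensB : List String :=
  ["десять", "одиннадцать", "двенадцать", "тринадцать", "четырнадцать",
   "пятнадцать", "шестнадцать", "семнадцать", "восемнадцать", "девятнадцать"]
def pvTensB : List String :=
  ["двадцать", "тридцать", "сорок", "пятьдесят", "шестьдесят",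
   "семьдесят", "восемьдесят", "девяносто"]
def pvHundredsB : List String :=
  ["сто", "двести", "триста", "четыреста", "пятьсот",
   "шестьсот", "семьсот", "восемьсот", "девятьсот"]

def thousand_alt (rest : Int) (sex : String) : Int × List String :=
  let u := PySem.Int.mod rest 10
  let t := PySem.Int.floordiv (PySem.Int.mod rest 100) 10
  let h := PySem.Int.floordiv (PySem.Int.mod rest 1000) 100
  let pn : Int × List String :=
    if t == 1 then
      (2, [(PySem.List.pyGet? pvTeensB u).getD ""])
    else
      let pn0 : Int × List String :=
        if u != 0 then
          ((if u == 1 then 0 else if u ≤ 4 then 1 else 2),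
           [(PySem.List.pyGet? (if sex == "m" then pvUnitsM else pvUnitsF) u).getD ""])
        else (2, [])
      if t != 0 then (pn0.1, pn0.2 ++ [(PySem.List.pyGet? pvTensB (t - 2)).getD ""]) else pn0
  if h != 0 then (pn.1, pn.2 ++ [(PySem.List.pyGet? pvHundredsB (h - 1)).getD ""]) else pn

-- ===== PRECONDITION & SPEC =====
def Spec_thousand (rest : Int) (sex : String) (out : Int × List String) : Prop := out = thousand_alt rest sex
instance (rest : Int) (sex : String) (out : Int × List String) : Decidable (Spec_thousand rest sex out) := by unfold Spec_thousand; infer_instance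

-- ===== CLAIM (what is proved, stated in full; the proofs are below) =====
def Claim_equal_thousand : Prop := ∀ (rest : Int) (sex : String), Dom_thousand rest sex → Spec_thousand rest sex (thousand rest sex)

-- ===== LEMMAS AND PROOFS =====


-- both ports read `sex` only through the test `sex == "m"`
lemma thousand_sexEq (rest : Int) (sex sex' : String) (h : (sex == "m") = (sex' == "m")) :
    thousand rest sex = thousand rest sex' := by
  simp only [thousand, pvStepA, h]

lemma thousand_alt_sexEq (rest : Int) (sex sex' : String) (h : (sex == "m") = (sex' == "m")) :
    thousand_alt rest sex = thousand_alt rest sex' := by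
  simp only [thousand_alt, h]

-- both ports read `rest` only modulo 10 / 100 / 1000, hence only modulo 1000
lemma pvStepA_modEq (rest rest' : Int) (sex : String) (b : Bool)
    (names : List (String ⊕ (String × String))) (x : Int) (st : Int × Int × List String)
    (hx : x = 10 ∨ x = 100 ∨ x = 1000) (h : rest % 1000 = rest' % 1000) :
    pvStepA rest sex b names x st = pvStepA rest' sex b names x st := by
  have h1 : PySem.Int.mod (rest - st.1) x = PySem.Int.mod (rest' - st.1) x := by
    rcases hx with rfl | rfl | rfl <;>
      (rw [PySem.Int.mod_eq_emod_of_pos (by norm_num), PySem.Int.mod_eq_emod_of_pos (by norm_num)]; omega)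
  have h2 : PySem.Int.mod rest x = PySem.Int.mod rest' x := by
    rcases hx with rfl | rfl | rfl <;>
      (rw [PySem.Int.mod_eq_emod_of_pos (by norm_num), PySem.Int.mod_eq_emod_of_pos (by norm_num)]; omega)
  simp only [pvStepA, h1, h2]

lemma thousand_modEq (rest : Int) (sex : String) :
    thousand rest sex = thousand (rest % 1000) sex := by
  have h : rest % 1000 = rest % 1000 % 1000 := by omega
  have h100 : PySem.Int.mod rest 100 = PySem.Int.mod (rest % 1000) 100 := by
    rw [PySem.Int.mod_eq_emod_of_pos (by norm_num), PySem.Int.mod_eq_emod_of_pos (by norm_num)]; omega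
  simp only [thousand, h100]
  refine congrArg (fun r : Int × Int × List String => (r.2.1, r.2.2)) ?_
  refine PySem.List.foldl_congr_mem _ _ _ _ (fun st p hp => ?_)
  have hx : p.2 = 10 ∨ p.2 = 100 ∨ p.2 = 1000 := by
    split at hp <;> simp only [List.mem_cons, List.not_mem_nil, or_false] at hp <;>
      [rcases hp with rfl | rfl | rfl; rcases hp with rfl | rfl] <;> simp
  exact pvStepA_modEq _ _ _ _ _ _ _ hx (by omega)

lemma thousand_alt_modEq (rest : Int) (sex : String) :
    thousand_alt rest sex = thousand_alt (rest % 1000) sex := by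
  have e10 : PySem.Int.mod rest 10 = PySem.Int.mod (rest % 1000) 10 := by
    rw [PySem.Int.mod_eq_emod_of_pos (by norm_num), PySem.Int.mod_eq_emod_of_pos (by norm_num)]; omega
  have e100 : PySem.Int.mod rest 100 = PySem.Int.mod (rest % 1000) 100 := by
    rw [PySem.Int.mod_eq_emod_of_pos (by norm_num), PySem.Int.mod_eq_emod_of_pos (by norm_num)]; omega
  have e1000 : PySem.Int.mod rest 1000 = PySem.Int.mod (rest % 1000) 1000 := by
    rw [PySem.Int.mod_eq_emod_of_pos (by norm_num), PySem.Int.mod_eq_emod_of_pos (by norm_num)]; omega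
  simp only [thousand_alt, e10, e100, e1000]

-- the finite core: agreement on all residues mod 1000 for both gender branches
set_option maxHeartbeats 4000000 in
set_option maxRecDepth 20000 in
lemma pvCore : ∀ n ∈ List.range 1000,
    thousand (n : Int) "m" = thousand_alt (n : Int) "m" ∧
    thousand (n : Int) "f" = thousand_alt (n : Int) "f" := by decide

-- ===== VERDICT (by name: the statement is the Claim_ definition above) =====
theorem thousand_spec : Claim_equal_thousand := by
  intro rest sex _
  unfold Spec_thousand
  have h0 : 0 ≤ rest % 1000 := Int.emod_nonneg _ (by norm_num)
  have h1 : rest % 1000 < 1000 := Int.emod_lt_of_pos _ (by norm_num)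
  have hcast : ((rest % 1000).toNat : Int) = rest % 1000 := Int.toNat_of_nonneg h0
  obtain ⟨hm, hf⟩ := pvCore (rest % 1000).toNat (List.mem_range.mpr (by omega))
  rw [hcast] at hm hf
  by_cases hs : (sex == "m") = true
  · rw [thousand_modEq, thousand_sexEq _ sex "m" (by simp [hs]),
        thousand_alt_modEq, thousand_alt_sexEq _ sex "m" (by simp [hs]), hm]
  · have hs2 : (sex == "m") = false := by simpa using hs
    rw [thousand_modEq, thousand_sexEq _ sex "f" (by simp [hs2]),
        thousand_alt_modEq, thousand_alt_sexEq _ sex "f" (by simp [hs2]), hf]
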